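-- pv_equiv track=rewrite | github.com/zbarbur/data-classifier | data_classifier/engines/heuristic_engine.py | compute_char_class_diversity
-- ===== SOURCE A (Python) =====
-- def compute_char_class_diversity(value: str) -> int:
--     """Count how many character classes are present in a single value.
--
--     Classes: uppercase, lowercase, digits, special characters.
--     Returns 0-4.  Real secrets typically use 3-4 classes; numeric IDs
--     use 1, natural text uses 2-3 (but rarely has digits + special together).
--     """
--     if not value:
--         return 0
--     classes = 0
--     has_upper = has_lower = has_digit = has_special = False
--     for c in value:
--         if c.isupper():
--             has_upper = True
--         elif c.islower():
--             has_lower = True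
--         elif c.isdigit():
--             has_digit = True
--         else:
--             has_special = True
--     classes = sum([has_upper, has_lower, has_digit, has_special])
--     return classes
-- ===== SOURCE B (Python) =====
-- def compute_char_class_diversity(value: str) -> int:
--     has_upper = any(c.isupper() for c in value)
--     has_lower = any(c.islower() for c in value)
--     has_digit = any(c.isdigit() for c in value)
--     has_special = any(not (c.isupper() or c.islower() or c.isdigit()) for c in value)
--     return sum([has_upper, has_lower, has_digit, has_special])
-- ===== Notes on version B (the rewrite author's own statement) =====
-- stated objective: idiomatic
-- what changed: Replaces the single stateful loop with four mutable flags by four independent any() scans, one per character class, with the special class defined as the complement of the other three; no guard for an empty input is needed since each any() is then False.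
import Mathlib
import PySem

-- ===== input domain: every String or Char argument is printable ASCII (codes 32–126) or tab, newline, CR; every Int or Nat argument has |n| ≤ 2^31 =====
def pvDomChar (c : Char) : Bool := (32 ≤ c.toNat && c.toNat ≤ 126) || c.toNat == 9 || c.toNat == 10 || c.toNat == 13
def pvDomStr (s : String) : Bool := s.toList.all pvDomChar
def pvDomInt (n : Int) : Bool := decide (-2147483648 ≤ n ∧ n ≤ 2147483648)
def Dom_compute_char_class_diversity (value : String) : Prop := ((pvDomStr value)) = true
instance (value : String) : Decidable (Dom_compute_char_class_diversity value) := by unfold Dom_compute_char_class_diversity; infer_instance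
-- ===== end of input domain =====

-- B replaces A's single stateful four-flag loop with four independent any() scans (idiomatic; same cost).

-- ===== PORT A =====
def pvStepA (s : Bool × Bool × Bool × Bool) (c : Char) : Bool × Bool × Bool × Bool :=
  if PySem.Chars.isupper c then (true, s.2.1, s.2.2.1, s.2.2.2)
  else if PySem.Chars.islower c then (s.1, true, s.2.2.1, s.2.2.2)
  else if PySem.Chars.isdigit c then (s.1, s.2.1, true, s.2.2.2)
  else (s.1, s.2.1, s.2.2.1, true)

def compute_char_class_diversity (value : String) : Int :=
  if value.toList = [] then 0
  else
    let st := value.toList.foldl pvStepA (false, false, false, false)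
    (if st.1 then (1 : Int) else 0) + (if st.2.1 then 1 else 0) +
    (if st.2.2.1 then 1 else 0) + (if st.2.2.2 then 1 else 0)

-- ===== PORT B =====
def compute_char_class_diversity_alt (value : String) : Int :=
  let l := value.toList
  let has_upper := l.any PySem.Chars.isupper
  let has_lower := l.any PySem.Chars.islower
  let has_digit := l.any PySem.Chars.isdigit
  let has_special := l.any (fun c => !(PySem.Chars.isupper c || PySem.Chars.islower c || PySem.Chars.isdigit c))
  (if has_upper then (1 : Int) else 0) + (if has_lower then 1 else 0) +
  (if has_digit then 1 else 0) + (if has_special then 1 else 0)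

-- ===== PRECONDITION & SPEC =====
def Spec_compute_char_class_diversity (value : String) (out : Int) : Prop := out = compute_char_class_diversity_alt value
instance (value : String) (out : Int) : Decidable (Spec_compute_char_class_diversity value out) := by unfold Spec_compute_char_class_diversity; infer_instance

-- ===== CLAIM (what is proved, stated in full; the proofs are below) =====
def Claim_equal_compute_char_class_diversity : Prop := ∀ (value : String), Dom_compute_char_class_diversity value → Spec_compute_char_class_diversity value (compute_char_class_diversity value)

-- ===== LEMMAS AND PROOFS =====

-- the three character-class ranges are pairwise disjoint (for every Char, no Dom needed)
theorem pv_up_disj (c : Char) (h : PySem.Chars.isupper c = true) :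
    PySem.Chars.islower c = false ∧ PySem.Chars.isdigit c = false := by
  simp [PySem.Chars.isupper, PySem.Chars.islower, PySem.Chars.isdigit, Char.le_def, UInt32.le_iff_toNat_le] at *
  omega

theorem pv_low_disj (c : Char) (h : PySem.Chars.islower c = true) :
    PySem.Chars.isdigit c = false := by
  simp [PySem.Chars.islower, PySem.Chars.isdigit, Char.le_def, UInt32.le_iff_toNat_le] at *
  omega

theorem pv_foldA (l : List Char) (hu hl hd hs : Bool) :
    l.foldl pvStepA (hu, hl, hd, hs) =
      (hu || l.any PySem.Chars.isupper,
       hl || l.any PySem.Chars.islower,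
       hd || l.any PySem.Chars.isdigit,
       hs || l.any (fun c => !(PySem.Chars.isupper c || PySem.Chars.islower c || PySem.Chars.isdigit c))) := by
  induction l generalizing hu hl hd hs with
  | nil => simp
  | cons c t ih =>
    by_cases h1 : PySem.Chars.isupper c = true
    · obtain ⟨h2, h3⟩ := pv_up_disj c h1
      simp [pvStepA, h1, h2, h3, ih]
    · rw [Bool.not_eq_true] at h1
      by_cases h2 : PySem.Chars.islower c = true
      · have h3 := pv_low_disj c h2
        simp [pvStepA, h1, h2, h3, ih]
      · rw [Bool.not_eq_true] at h2
        by_cases h3 : PySem.Chars.isdigit c = true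
        · simp [pvStepA, h1, h2, h3, ih]
        · rw [Bool.not_eq_true] at h3
          simp [pvStepA, h1, h2, h3, ih]

-- ===== VERDICT (by name: the statement is the Claim_ definition above) =====
theorem compute_char_class_diversity_spec : Claim_equal_compute_char_class_diversity := by
  intro value _
  unfold Spec_compute_char_class_diversity compute_char_class_diversity compute_char_class_diversity_alt
  rw [pv_foldA]
  by_cases h : value.toList = []
  · simp [h]
  · simp [h]
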